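-- pv_equiv track=rewrite | github.com/OfirArviv/ud-reordering | experiments/scripts/dataset_creation/create_mtop_dataset.py | _convert_bare_closing_parentesis_to_full
-- ===== SOURCE A (Python) =====
-- def _convert_bare_closing_parentesis_to_full(decoupled_form_string: str):
--     def _find_parens(s):
--         toret = {}
--         pstack = []
--
--         for i, c in enumerate(s.split(" ")):
--             if c.startswith('['):
--                 pstack.append(i)
--             elif c == ']':
--                 if len(pstack) == 0:
--                     raise IndexError("No matching closing parens at: " + str(i))
--                 toret[pstack.pop()] = i
--
--         if len(pstack) > 0:
--             raise IndexError("No matching opening parens at: " + str(pstack.pop()))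
--
--         return toret
--
--     matching_parentheses_dict = _find_parens(decoupled_form_string)
--     decoupled_form_string_formatted = decoupled_form_string.split(" ")
--     for s_idx in matching_parentheses_dict.keys():
--         e_idx = matching_parentheses_dict[s_idx]
--         s_idx_type = decoupled_form_string_formatted[s_idx][1:]
--         e_idx_new_str = f'{s_idx_type}]'
--         decoupled_form_string_formatted[e_idx] = e_idx_new_str
--     target_sequence = " ".join(decoupled_form_string_formatted)
--
--     return target_sequence
-- ===== SOURCE B (Python) =====
-- def _convert_bare_closing_parentesis_to_full(decoupled_form_string: str):
--     # One left-to-right pass: push (bracket type, index) for openers, and on a bare ']'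
--     # pop and rewrite the token in place; no intermediate index->index dict.
--     tokens = decoupled_form_string.split(" ")
--     stack = []
--     for i, tok in enumerate(tokens):
--         if tok.startswith('['):
--             stack.append((tok[1:], i))
--         elif tok == ']':
--             if not stack:
--                 raise IndexError("No matching closing parens at: " + str(i))
--             typ, _ = stack.pop()
--             tokens[i] = typ + ']'
--     if stack:
--         raise IndexError("No matching opening parens at: " + str(stack[-1][1]))
--     return " ".join(tokens)
-- ===== Notes on version B (the rewrite author's own statement) =====
-- stated objective: simpler
-- what changed: B does everything in one left-to-right pass with a stack of (bracket-type, index) pairs, overwriting each bare ']' in place as soon as it is matched, instead of A's two-phase scheme that first builds an opener-index-to-closer-index dict and then runs a second loop over the dict filling in the closers.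
import Mathlib
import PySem

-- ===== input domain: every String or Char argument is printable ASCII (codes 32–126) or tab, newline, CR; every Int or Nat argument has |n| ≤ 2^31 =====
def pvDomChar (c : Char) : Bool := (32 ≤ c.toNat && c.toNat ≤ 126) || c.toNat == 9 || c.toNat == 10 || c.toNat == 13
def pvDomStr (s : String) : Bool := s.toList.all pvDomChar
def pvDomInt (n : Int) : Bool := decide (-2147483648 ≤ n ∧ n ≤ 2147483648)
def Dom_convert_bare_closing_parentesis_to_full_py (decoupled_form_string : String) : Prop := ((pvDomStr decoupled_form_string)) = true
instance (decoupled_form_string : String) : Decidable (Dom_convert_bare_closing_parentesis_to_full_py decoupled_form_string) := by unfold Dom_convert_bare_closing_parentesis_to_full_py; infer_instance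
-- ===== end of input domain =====

-- B replaces A's two-phase dict-then-fill scheme with a single stack pass that rewrites
-- each bare ']' in place (objective: simpler).

-- ===== PORT A =====
-- s.split(" "): the separator " " is non-empty, so PySem.Str.split? is always `some`
def pvSplit (s : String) : List String := (PySem.Str.split? s " ").getD []

-- one step of the `for i, c in enumerate(s.split(" "))` loop of _find_parens;
-- `none` models the raised IndexError (excluded by Pre_)
def pvStepA (st : Option (PySem.Dict Int Int × List Int)) (p : Int × String) :
    Option (PySem.Dict Int Int × List Int) :=
  match st with
  | none => none
  | some (toret, pstack) =>
    if PySem.Str.startswith p.2 "[" then some (toret, p.1 :: pstack)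
    else if p.2 == "]" then
      match pstack with
      | [] => none
      | j :: rest => some (toret.insert j p.1, rest)
    else some (toret, pstack)

-- _find_parens: none = an IndexError was raised
def pvFindParens (ts : List String) : Option (PySem.Dict Int Int) :=
  match (PySem.List.enumerate ts 0).foldl pvStepA (some (PySem.Dict.empty, [])) with
  | none => none
  | some (toret, pstack) => if pstack.length > 0 then none else some toret

def convert_bare_closing_parentesis_to_full_py (decoupled_form_string : String) : String :=
  match pvFindParens (pvSplit decoupled_form_string) with
  | none => ""  -- Python raises IndexError here; these inputs are excluded by Pre_
  | some d =>
    -- for s_idx in matching_parentheses_dict.keys(): …  (list indexing is always in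
    -- range here, so the total pyGetD/pySetD forms are exact)
    PySem.Str.join " " (d.keys.foldl (fun fmt sIdx =>
      PySem.List.pySetD fmt (d.getD sIdx 0)
        (PySem.Str.slice (PySem.List.pyGetD fmt sIdx "") (some 1) none ++ "]"))
      (pvSplit decoupled_form_string))

-- ===== PORT B =====
-- one step of Source B's single pass; Source B mutates only the current position i after
-- reading tokens[i], so reading the token from the enumeration of the ORIGINAL list
-- is exact; `none` models the raised IndexError (excluded by Pre_)
def pvStepB (st : Option (List String × List (String × Int))) (p : Int × String) :
    Option (List String × List (String × Int)) :=
  match st with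
  | none => none
  | some (toks, stack) =>
    if PySem.Str.startswith p.2 "[" then
      some (toks, (PySem.Str.slice p.2 (some 1) none, p.1) :: stack)
    else if p.2 == "]" then
      match stack with
      | [] => none
      | (typ, _) :: rest => some (PySem.List.pySetD toks p.1 (typ ++ "]"), rest)
    else some (toks, stack)

def convert_bare_closing_parentesis_to_full_py_alt (decoupled_form_string : String) : String :=
  match (PySem.List.enumerate (pvSplit decoupled_form_string) 0).foldl pvStepB
      (some (pvSplit decoupled_form_string, [])) with
  | none => ""  -- Python raises IndexError; excluded by Pre_
  | some (toks, stack) => if stack.isEmpty then PySem.Str.join " " toks else ""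

-- ===== PRECONDITION & SPEC =====
def pvOpen (t : String) : Bool := PySem.Str.startswith t "["
def pvClose (t : String) : Bool := t == "]"

-- Exactly the inputs on which A returns normally: the bracket tokens are balanced
-- (no prefix has more bare closers than openers, and the totals agree); on all other
-- inputs both A and B raise IndexError.
def Pre_convert_bare_closing_parentesis_to_full_py (decoupled_form_string : String) : Prop :=
  (∀ k : Nat, k ≤ (pvSplit decoupled_form_string).length →
      ((pvSplit decoupled_form_string).take k).countP pvClose ≤
      ((pvSplit decoupled_form_string).take k).countP pvOpen) ∧
  (pvSplit decoupled_form_string).countP pvClose =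
    (pvSplit decoupled_form_string).countP pvOpen

instance (decoupled_form_string : String) : Decidable (Pre_convert_bare_closing_parentesis_to_full_py decoupled_form_string) := by
  unfold Pre_convert_bare_closing_parentesis_to_full_py; infer_instance

def pvWitness_convert_bare_closing_parentesis_to_full_py : String := "[IN:X [SL:Y a ] b ]"

def Spec_convert_bare_closing_parentesis_to_full_py (decoupled_form_string : String) (out : String) : Prop :=
  out = convert_bare_closing_parentesis_to_full_py_alt decoupled_form_string

instance (decoupled_form_string : String) (out : String) : Decidable (Spec_convert_bare_closing_parentesis_to_full_py decoupled_form_string out) := by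
  unfold Spec_convert_bare_closing_parentesis_to_full_py; infer_instance

-- ===== CLAIM (what is proved, stated in full; the proofs are below) =====
def Claim_equal_convert_bare_closing_parentesis_to_full_py : Prop :=
  ∀ (decoupled_form_string : String),
    Dom_convert_bare_closing_parentesis_to_full_py decoupled_form_string →
    Pre_convert_bare_closing_parentesis_to_full_py decoupled_form_string →
    Spec_convert_bare_closing_parentesis_to_full_py decoupled_form_string
      (convert_bare_closing_parentesis_to_full_py decoupled_form_string)

-- ===== LEMMAS AND PROOFS =====

-- the effect of A's second loop, expressed over the dict's items list
def pvApply (xs : List String) (l : List (Int × Int)) : List String :=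
  l.foldl (fun ys p =>
    PySem.List.pySetD ys p.2
      (PySem.Str.slice (PySem.List.pyGetD ys p.1 "") (some 1) none ++ "]")) xs

-- B's stack entry corresponding to an opener index j of the original token list
def pvTyp (ts0 : List String) (j : Int) : String × Int :=
  (PySem.Str.slice (PySem.List.pyGetD ts0 j "") (some 1) none, j)

-- relation between the two folds' results
def pvRel (ts0 : List String) (a : Option (PySem.Dict Int Int × List Int))
    (b : Option (List String × List (String × Int))) : Prop :=
  match a, b with
  | none, none => True
  | some (d, pA), some (tk, pB) =>
      d.keys.Nodup ∧ pB.length = pA.length ∧ tk = pvApply ts0 d.items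
  | _, _ => False

theorem pvStepA_none (l : List (Int × String)) : l.foldl pvStepA none = none := by
  induction l with
  | nil => rfl
  | cons x xs ih => simpa [pvStepA] using ih

theorem pvStepB_none (l : List (Int × String)) : l.foldl pvStepB none = none := by
  induction l with
  | nil => rfl
  | cons x xs ih => simpa [pvStepB] using ih

theorem pvGetD_set_ne {α : Type} (xs : List α) (a b : Nat) (v : α) (d : α) (h : a ≠ b) :
    (xs.set b v).getD a d = xs.getD a d := by
  simp [List.getD, List.getElem?_set_ne (Ne.symm h)]

theorem pvMain (ts0 : List String) :
    ∀ (ts : List String) (i : Nat) (d : PySem.Dict Int Int) (pA : List Int) (tk : List String),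
      ts0.drop i = ts →
      d.keys.Nodup →
      (∀ k ∈ d.keys, 0 ≤ k ∧ k < (i : Int)) →
      (∀ j ∈ pA, 0 ≤ j ∧ j < (i : Int)) →
      pA.Pairwise (· > ·) →
      (∀ j ∈ pA, d.contains j = false) →
      tk = pvApply ts0 d.items →
      (∀ m : Nat, i ≤ m → tk.getD m "" = ts0.getD m "") →
      (∀ j ∈ pA, tk.getD j.toNat "" = ts0.getD j.toNat "") →
      pvRel ts0 ((PySem.List.enumerate ts (i : Int)).foldl pvStepA (some (d, pA)))
        ((PySem.List.enumerate ts (i : Int)).foldl pvStepB (some (tk, pA.map (pvTyp ts0)))) := by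
  intro ts
  induction ts with
  | nil =>
    intro i d pA tk hdrop hnd hk hp hpw hdis htk hge hstk
    simp only [PySem.List.enumerate_nil, List.foldl_nil, pvRel]
    exact ⟨hnd, by simp, htk⟩
  | cons t ts' ih =>
    intro i d pA tk hdrop hnd hk hp hpw hdis htk hge hstk
    have hti : ts0[i]? = some t := by
      have h0 := congrArg (fun l => l[0]?) hdrop
      simpa using h0
    have hdrop' : ts0.drop (i + 1) = ts' := by
      have h1 := congrArg List.tail hdrop
      simpa [List.tail_drop] using h1
    have hcast : (i : Int) + 1 = ((i + 1 : Nat) : Int) := by push_cast; ring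
    rw [PySem.List.enumerate_cons, List.foldl_cons, List.foldl_cons, hcast]
    by_cases hop : PySem.Chars.startswith t.toList ['['] = true
    · -- opener: push
      have hty : pvTyp ts0 (i : Int) = (PySem.Str.slice t (some 1) none, (i : Int)) := by
        simp [pvTyp, PySem.List.pyGetD_natCast, List.getD, hti]
      have stepA : pvStepA (some (d, pA)) ((i : Int), t) = some (d, (i : Int) :: pA) := by
        simp [pvStepA, hop]
      have stepB : pvStepB (some (tk, pA.map (pvTyp ts0))) ((i : Int), t)
          = some (tk, ((i : Int) :: pA).map (pvTyp ts0)) := by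
        simp [pvStepB, hop, hty]
      rw [stepA, stepB]
      refine ih (i + 1) d ((i : Int) :: pA) tk hdrop' hnd ?_ ?_ ?_ ?_ htk ?_ ?_
      · intro k hkm
        obtain ⟨h1, h2⟩ := hk k hkm
        exact ⟨h1, by push_cast; omega⟩
      · intro j hj
        rcases List.mem_cons.mp hj with hj | hj
        · constructor <;> (subst hj; push_cast) <;> omega
        · obtain ⟨h1, h2⟩ := hp j hj
          exact ⟨h1, by push_cast; omega⟩
      · exact List.Pairwise.cons (fun j hj => (hp j hj).2) hpw
      · intro j hj
        rcases List.mem_cons.mp hj with hj | hj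
        · subst hj
          cases h : d.contains (i : Int)
          · rfl
          · exfalso
            have hm := (PySem.Dict.contains_iff_mem_keys d _).mp h
            have := (hk _ hm).2
            omega
        · exact hdis j hj
      · intro m hm
        exact hge m (by omega)
      · intro j hj
        rcases List.mem_cons.mp hj with hj | hj
        · subst hj
          simpa using hge i le_rfl
        · exact hstk j hj
    · have hopf : PySem.Chars.startswith t.toList ['['] = false := by
        simpa using hop
      by_cases hcl : t = "]"
      · -- closer
        subst hcl
        have hsb : PySem.Chars.startswith [']'] ['['] = false := by decide
        cases pA with
        | nil =>
          have stepA : pvStepA (some (d, ([] : List Int))) ((i : Int), "]") = none := by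
            simp [pvStepA, hsb]
          have stepB : pvStepB (some (tk, ([] : List Int).map (pvTyp ts0))) ((i : Int), "]") = none := by
            simp [pvStepB, hsb]
          rw [stepA, stepB, pvStepA_none, pvStepB_none]
          trivial
        | cons j rest =>
          obtain ⟨hj0, hji⟩ := hp j (List.mem_cons_self)
          have hjd : d.contains j = false := hdis j (List.mem_cons_self)
          have hgetj : PySem.List.pyGetD tk j "" = PySem.List.pyGetD ts0 j "" := by
            rw [PySem.List.pyGetD_of_nonneg tk "" hj0, PySem.List.pyGetD_of_nonneg ts0 "" hj0]
            exact hstk j (List.mem_cons_self)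
          have stepA : pvStepA (some (d, j :: rest)) ((i : Int), "]")
              = some (d.insert j (i : Int), rest) := by
            simp [pvStepA, hsb]
          have stepB : pvStepB (some (tk, (j :: rest).map (pvTyp ts0))) ((i : Int), "]")
              = some (PySem.List.pySetD tk (i : Int)
                  (PySem.Str.slice (PySem.List.pyGetD ts0 j "") (some 1) none ++ "]"),
                  rest.map (pvTyp ts0)) := by
            simp [pvStepB, hsb, pvTyp]
          rw [stepA, stepB]
          refine ih (i + 1) (d.insert j (i : Int)) rest
            (PySem.List.pySetD tk (i : Int)
              (PySem.Str.slice (PySem.List.pyGetD ts0 j "") (some 1) none ++ "]"))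
            hdrop' (PySem.Dict.nodup_keys_insert d j (i : Int) hnd) ?_ ?_ ?_ ?_ ?_ ?_ ?_
          · intro k hkm
            rw [PySem.Dict.mem_keys_insert] at hkm
            rcases hkm with hkm | hkm
            · subst hkm
              constructor
              · exact hj0
              · push_cast; omega
            · obtain ⟨h1, h2⟩ := hk k hkm
              exact ⟨h1, by push_cast; omega⟩
          · intro j' hj'
            obtain ⟨h1, h2⟩ := hp j' (List.mem_cons_of_mem _ hj')
            exact ⟨h1, by push_cast; omega⟩
          · exact hpw.of_cons
          · intro j' hj'
            have hlt : j > j' := (List.pairwise_cons.mp hpw).1 j' hj'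
            rw [PySem.Dict.contains_insert]
            have hne : (j' == j) = false := by simp; omega
            rw [hne, hdis j' (List.mem_cons_of_mem _ hj')]
            rfl
          · rw [PySem.Dict.items_insert_of_not_contains d _ hjd]
            unfold pvApply
            unfold pvApply at htk
            rw [List.foldl_append]
            simp only [List.foldl_cons, List.foldl_nil]
            rw [← htk, hgetj]
          · intro m hm
            rw [PySem.List.pySetD_natCast tk i]
            rw [pvGetD_set_ne tk m i _ "" (by omega)]
            exact hge m (by omega)
          · intro j' hj'
            have hlt : j > j' := (List.pairwise_cons.mp hpw).1 j' hj'
            have h0' : 0 ≤ j' := (hp j' (List.mem_cons_of_mem _ hj')).1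
            rw [PySem.List.pySetD_natCast tk i]
            rw [pvGetD_set_ne tk j'.toNat i _ "" (by omega)]
            exact hstk j' (List.mem_cons_of_mem _ hj')
      · -- other token: state unchanged
        have stepA : pvStepA (some (d, pA)) ((i : Int), t) = some (d, pA) := by
          simp [pvStepA, hopf, hcl]
        have stepB : pvStepB (some (tk, pA.map (pvTyp ts0))) ((i : Int), t)
            = some (tk, pA.map (pvTyp ts0)) := by
          simp [pvStepB, hopf, hcl]
        rw [stepA, stepB]
        refine ih (i + 1) d pA tk hdrop' hnd ?_ ?_ hpw hdis htk ?_ hstk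
        · intro k hkm
          obtain ⟨h1, h2⟩ := hk k hkm
          exact ⟨h1, by push_cast; omega⟩
        · intro j hj
          obtain ⟨h1, h2⟩ := hp j hj
          exact ⟨h1, by push_cast; omega⟩
        · intro m hm
          exact hge m (by omega)

theorem pvFinal (s : String) :
    convert_bare_closing_parentesis_to_full_py s =
      convert_bare_closing_parentesis_to_full_py_alt s := by
  have hempty : (PySem.Dict.empty : PySem.Dict Int Int).items = [] := rfl
  have hmain := pvMain (pvSplit s) (pvSplit s) 0 PySem.Dict.empty [] (pvSplit s)
    (by simp) (by simp [PySem.Dict.keys, hempty]) (by simp [PySem.Dict.keys, hempty]) (by simp)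
    (by simp) (by simp) rfl (fun m _ => rfl) (by simp)
  simp only [Nat.cast_zero, List.map_nil] at hmain
  unfold convert_bare_closing_parentesis_to_full_py convert_bare_closing_parentesis_to_full_py_alt
    pvFindParens
  cases hA : (PySem.List.enumerate (pvSplit s) 0).foldl pvStepA (some (PySem.Dict.empty, [])) with
  | none =>
    rw [hA] at hmain
    cases hB : (PySem.List.enumerate (pvSplit s) 0).foldl pvStepB (some (pvSplit s, [])) with
    | none => rfl
    | some q =>
      rw [hB] at hmain
      exact absurd hmain (by obtain ⟨tk, pB⟩ := q; simp [pvRel])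
  | some p =>
    obtain ⟨d, pA⟩ := p
    rw [hA] at hmain
    cases hB : (PySem.List.enumerate (pvSplit s) 0).foldl pvStepB (some (pvSplit s, [])) with
    | none =>
      rw [hB] at hmain
      exact absurd hmain (by simp [pvRel])
    | some q =>
      obtain ⟨tk, pB⟩ := q
      rw [hB] at hmain
      obtain ⟨hnd, hlen, htk⟩ := hmain
      cases pA with
      | cons j rest =>
        have hne : pB ≠ [] := by
          intro h; rw [h] at hlen; simp at hlen
        simp [hne, List.isEmpty_iff]
      | nil =>
        have hpB : pB = [] := List.length_eq_zero_iff.mp (by simpa using hlen)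
        subst hpB
        simp only [List.length_nil, gt_iff_lt, Nat.lt_irrefl, if_false, List.isEmpty_nil,
          if_true]
        congr 1
        rw [htk]
        unfold pvApply
        rw [PySem.Dict.items_eq_map_keys d hnd (0 : Int)]
        rw [List.foldl_map]

-- ===== VERDICT (by name: the statement is the Claim_ definition above) =====
theorem convert_bare_closing_parentesis_to_full_py_spec : Claim_equal_convert_bare_closing_parentesis_to_full_py := by
  intro s _ _
  unfold Spec_convert_bare_closing_parentesis_to_full_py
  exact pvFinal s
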